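-- pv_equiv track=rewrite | github.com/JeremyXu555/Codility | Codility/src/MaxCounters.py | solution
-- ===== SOURCE A (Python) =====
-- def solution(N, A):
--     counter = [0] * N
--     for index in range(len(A)):
--         if 1 <= A[index] <= N:
--             counter[A[index] - 1] += 1
--         else:
--             counter = [max(counter)] * N
--     return counter
-- ===== SOURCE B (Python) =====
-- def solution(N, A):
--     counters = [0] * N
--     maxc = 0      # running maximum of the true counter values
--     lastmax = 0   # value every counter was lazily raised to at the last max_counter op
--     for x in A:
--         if 1 <= x <= N:
--             v = max(counters[x - 1], lastmax) + 1
--             counters[x - 1] = v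
--             if v > maxc:
--                 maxc = v
--         else:
--             lastmax = maxc
--     return [max(v, lastmax) for v in counters]
-- ===== Notes on version B (the rewrite author's own statement) =====
-- stated objective: faster
-- what changed: Replaces the O(N) rebuild of the whole counter array at every max_counter operation (and the O(N) max scan) by lazy max tracking: a running maximum and a last-applied floor, applied per-counter on access and once at the end.
import Mathlib
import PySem

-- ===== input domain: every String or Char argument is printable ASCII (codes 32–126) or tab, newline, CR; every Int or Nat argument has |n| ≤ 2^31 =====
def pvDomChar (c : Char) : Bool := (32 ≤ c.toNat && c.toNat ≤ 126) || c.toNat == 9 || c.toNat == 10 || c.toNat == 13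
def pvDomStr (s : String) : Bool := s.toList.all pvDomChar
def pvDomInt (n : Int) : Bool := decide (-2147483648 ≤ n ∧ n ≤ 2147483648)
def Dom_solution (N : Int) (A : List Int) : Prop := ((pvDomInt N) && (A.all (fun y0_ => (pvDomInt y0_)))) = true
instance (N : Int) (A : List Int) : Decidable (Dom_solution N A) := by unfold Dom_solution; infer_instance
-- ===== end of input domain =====

-- B replaces A's O(N) counter-array rebuild at every out-of-range operation by lazy max
-- tracking (running max + last-applied floor), O(N+M) instead of O(N*M); return values agree.

-- ===== PORT A =====
def solution (N : Int) (A : List Int) : List Int :=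
  let counter := List.replicate N.toNat (0 : Int)          -- [0] * N
  (PySem.List.pyRange 0 (A.length : Int) 1).foldl (fun counter index =>
    let a := PySem.List.pyGetD A index 0                   -- A[index]
    if 1 ≤ a ∧ a ≤ N then
      PySem.List.pySetD counter (a - 1) (PySem.List.pyGetD counter (a - 1) 0 + 1)
    else
      List.replicate N.toNat ((PySem.List.max? counter (fun y => y)).getD 0))  -- [max(counter)] * N
    counter

-- ===== PORT B =====
def solution_alt (N : Int) (A : List Int) : List Int :=
  let st := A.foldl (fun (s : List Int × Int × Int) x =>
    let c := s.1
    let maxc := s.2.1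
    let lastmax := s.2.2
    if 1 ≤ x ∧ x ≤ N then
      let v := max (PySem.List.pyGetD c (x - 1) 0) lastmax + 1
      (PySem.List.pySetD c (x - 1) v, if v > maxc then v else maxc, lastmax)
    else
      (c, maxc, maxc)) (List.replicate N.toNat (0 : Int), 0, 0)
  st.1.map (fun v => max v st.2.2)

-- ===== PRECONDITION & SPEC =====
-- Pre_ excludes exactly the inputs on which A raises: with N <= 0 the counter list is empty,
-- so the first element of A (necessarily outside 1..N) makes max(counter) raise ValueError.
def Pre_solution (N : Int) (A : List Int) : Prop := 0 < N ∨ A = []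
instance (N : Int) (A : List Int) : Decidable (Pre_solution N A) := by unfold Pre_solution; infer_instance
def pvWitness_solution : Int × List Int := (3, [1, 3, 5, 2])

def Spec_solution (N : Int) (A : List Int) (out : List Int) : Prop := out = solution_alt N A
instance (N : Int) (A : List Int) (out : List Int) : Decidable (Spec_solution N A out) := by unfold Spec_solution; infer_instance

-- ===== CLAIM (what is proved, stated in full; the proofs are below) =====
def Claim_equal_solution : Prop := ∀ (N : Int) (A : List Int), Dom_solution N A → Pre_solution N A → Spec_solution N A (solution N A)

-- ===== LEMMAS AND PROOFS =====

-- The A-side loop body and B-side loop body, as standalone functions.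
def stepA (N : Int) (counter : List Int) (a : Int) : List Int :=
  if 1 ≤ a ∧ a ≤ N then
    PySem.List.pySetD counter (a - 1) (PySem.List.pyGetD counter (a - 1) 0 + 1)
  else
    List.replicate N.toNat ((PySem.List.max? counter (fun y => y)).getD 0)

def stepB (N : Int) (s : List Int × Int × Int) (x : Int) : List Int × Int × Int :=
  if 1 ≤ x ∧ x ≤ N then
    let v := max (PySem.List.pyGetD s.1 (x - 1) 0) s.2.2 + 1
    (PySem.List.pySetD s.1 (x - 1) v, if v > s.2.1 then v else s.2.1, s.2.2)
  else
    (s.1, s.2.1, s.2.1)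

-- loop invariant relating A's counter to B's (counters, maxc, lastmax)
def CInv (N : Int) (ca c : List Int) (maxc lastmax : Int) : Prop :=
  ca.length = N.toNat ∧ c.length = N.toNat ∧
  (∀ i, i < ca.length → ca.getD i 0 = max (c.getD i 0) lastmax) ∧
  0 ≤ lastmax ∧ lastmax ≤ maxc ∧
  (∀ i, i < ca.length → ca.getD i 0 ≤ maxc) ∧
  maxc ∈ ca

theorem inv_max (N : Int) (ca c : List Int) (maxc lastmax : Int) (hN : 0 < N)
    (h : CInv N ca c maxc lastmax) :
    (PySem.List.max? ca (fun y => y)).getD 0 = maxc := by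
  obtain ⟨hca, hc, hrel, h0, hlm, hub, hmem⟩ := h
  have hne : ca ≠ [] := by
    intro e
    rw [e] at hca
    simp at hca
    omega
  have hsome : PySem.List.max? ca (fun y => y) ≠ none := by
    rw [Ne, PySem.List.max?_eq_none_iff]
    exact hne
  obtain ⟨m, hm⟩ := Option.ne_none_iff_exists'.mp hsome
  have hmmem := PySem.List.max?_mem hm
  have hmax := PySem.List.max?_isMax hm
  have h1 : maxc ≤ m := hmax maxc hmem
  have h2 : m ≤ maxc := by
    obtain ⟨i, hi, he⟩ := List.mem_iff_getElem.mp hmmem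
    have hb := hub i hi
    rw [List.getD_eq_getElem ca 0 hi, he] at hb
    exact hb
  rw [hm]
  simp
  omega

theorem getD_set_lt (l : List Int) (j i : Nat) (v : Int) (hi : i < l.length) :
    (l.set j v).getD i 0 = if j = i then v else l.getD i 0 := by
  rw [List.getD_eq_getElem _ _ (by simpa using hi), List.getElem_set, List.getD_eq_getElem _ _ hi]

theorem getD_replicate_zero (n i : Nat) : (List.replicate n (0 : Int)).getD i 0 = 0 := by
  by_cases hi : i < n
  · rw [List.getD_eq_getElem _ _ (by simpa using hi)]
    simp
  · rw [List.getD_eq_default _ _ (by simpa using hi)]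

theorem inv_step (N : Int) (ca c : List Int) (maxc lastmax : Int) (x : Int) (hN : 0 < N)
    (h : CInv N ca c maxc lastmax) :
    CInv N (stepA N ca x) (stepB N (c, maxc, lastmax) x).1
      (stepB N (c, maxc, lastmax) x).2.1 (stepB N (c, maxc, lastmax) x).2.2 := by
  obtain ⟨hca, hc, hrel, h0, hlm, hub, hmem⟩ := h
  by_cases hx : 1 ≤ x ∧ x ≤ N
  · have hx1 : (0:Int) ≤ x - 1 := by omega
    have hjlt : (x - 1).toNat < N.toNat := by omega
    simp only [stepA, stepB, if_pos hx, PySem.List.pyGetD_of_nonneg _ _ hx1,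
      PySem.List.pySetD_of_nonneg _ _ hx1]
    set j := (x - 1).toNat with hjdef
    set vB := max (c.getD j 0) lastmax + 1 with hvB
    have hrj : ca.getD j 0 = max (c.getD j 0) lastmax := hrel j (by omega)
    have hvB' : vB = ca.getD j 0 + 1 := by omega
    have hubj : ca.getD j 0 ≤ maxc := hub j (by omega)
    refine ⟨by simp [hca], by simp [hc], ?_, h0, ?_, ?_, ?_⟩
    · intro i hi
      have hi' : i < N.toNat := by simpa [hca] using hi
      rw [getD_set_lt _ _ _ _ (by omega), getD_set_lt _ _ _ _ (by omega)]
      by_cases hij : j = i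
      · rw [if_pos hij, if_pos hij]
        have : lastmax ≤ vB := by omega
        rw [max_eq_left this]
        omega
      · rw [if_neg hij, if_neg hij]
        exact hrel i (by omega)
    · split
      · omega
      · exact hlm
    · intro i hi
      have hi' : i < N.toNat := by simpa [hca] using hi
      rw [getD_set_lt _ _ _ _ (by omega)]
      have hubi := hub i (by omega)
      by_cases hij : j = i
      · rw [if_pos hij]
        split <;> omega
      · rw [if_neg hij]
        split <;> omega
    · by_cases hv : vB > maxc
      · rw [if_pos hv]
        refine List.mem_iff_getElem.mpr ⟨j, by simpa [hca] using hjlt, ?_⟩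
        rw [List.getElem_set, if_pos rfl]
        have : ca.getD j 0 = ca[j]'(by omega) := List.getD_eq_getElem ca 0 (by omega)
        omega
      · rw [if_neg hv]
        obtain ⟨i, hi, he⟩ := List.mem_iff_getElem.mp hmem
        have he' : ca.getD i 0 = maxc := by
          rw [List.getD_eq_getElem ca 0 hi]
          exact he
        have hij : j ≠ i := by
          intro e
          rw [← e] at he'
          omega
        refine List.mem_iff_getElem.mpr ⟨i, by simpa using hi, ?_⟩
        rw [List.getElem_set, if_neg hij]
        exact he
  · simp only [stepA, stepB, if_neg hx]
    rw [inv_max N ca c maxc lastmax hN ⟨hca, hc, hrel, h0, hlm, hub, hmem⟩]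
    have hcb : ∀ i, i < N.toNat → c.getD i 0 ≤ maxc := by
      intro i hi
      have h1 := hrel i (by omega)
      have h2 := hub i (by omega)
      omega
    refine ⟨by simp, hc, ?_, by omega, le_refl _, ?_, ?_⟩
    · intro i hi
      have hi' : i < N.toNat := by simpa using hi
      rw [List.getD_eq_getElem _ _ (by simpa using hi'), List.getElem_replicate]
      have := hcb i hi'
      omega
    · intro i hi
      have hi' : i < N.toNat := by simpa using hi
      rw [List.getD_eq_getElem _ _ (by simpa using hi'), List.getElem_replicate]
    · rw [List.mem_replicate]
      exact ⟨by omega, rfl⟩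

theorem inv_fold (N : Int) (A : List Int) (ca c : List Int) (maxc lastmax : Int) (hN : 0 < N)
    (h : CInv N ca c maxc lastmax) :
    CInv N (A.foldl (stepA N) ca) (A.foldl (stepB N) (c, maxc, lastmax)).1
      (A.foldl (stepB N) (c, maxc, lastmax)).2.1 (A.foldl (stepB N) (c, maxc, lastmax)).2.2 := by
  induction A generalizing ca c maxc lastmax with
  | nil => exact h
  | cons x t ih =>
      have := inv_step N ca c maxc lastmax x hN h
      simpa [List.foldl] using ih _ _ _ _ this

-- ===== VERDICT (by name: the statement is the Claim_ definition above) =====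
theorem init_inv (N : Int) (hN : 0 < N) :
    CInv N (List.replicate N.toNat 0) (List.replicate N.toNat 0) 0 0 := by
  refine ⟨by simp, by simp, ?_, le_refl _, le_refl _, ?_, ?_⟩
  · intro i hi
    rw [getD_replicate_zero]
    simp
  · intro i hi
    rw [getD_replicate_zero]
  · rw [List.mem_replicate]
    exact ⟨by omega, rfl⟩

theorem solution_spec : Claim_equal_solution := by
  intro N A _ hpre
  unfold Spec_solution
  rcases hpre with hN | hA
  · have hAfold : solution N A = A.foldl (stepA N) (List.replicate N.toNat 0) := by
      unfold solution
      exact PySem.List.foldl_pyRange_zero_pyGetD' A 0 (stepA N) (List.replicate N.toNat 0)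
    have hBfold : solution_alt N A =
        (A.foldl (stepB N) (List.replicate N.toNat 0, 0, 0)).1.map
          (fun v => max v (A.foldl (stepB N) (List.replicate N.toNat 0, 0, 0)).2.2) := rfl
    obtain ⟨h1, h2, h3, _, _, _, _⟩ :=
      inv_fold N A (List.replicate N.toNat 0) (List.replicate N.toNat 0) 0 0 hN (init_inv N hN)
    rw [hAfold, hBfold]
    apply List.ext_getElem
    · simp [h1, h2]
    · intro i hi1 hi2
      rw [List.getElem_map]
      have hrel := h3 i hi1
      rw [List.getD_eq_getElem _ _ hi1, List.getD_eq_getElem _ _ (by omega)] at hrel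
      exact hrel
  · subst hA
    unfold solution solution_alt
    simp
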